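-- pv_equiv track=rewrite | github.com/Jared-Caraan/Thinking-Chair | Programming Platforms/Codewars/6 kyu/odd_heavy_array.py | is_odd_heavy
-- ===== SOURCE A (Python) =====
-- def is_odd_heavy(arr):
--     odd_arr = [i for i in arr if i % 2 != 0 ]
--     even_arr = [i for i in arr if i % 2 == 0 ]
--
--     if not odd_arr:
--         return False
--
--     if not even_arr:
--         return True
--
--     max_even = max(even_arr)
--
--     for i in odd_arr:
--         if max_even >= i:
--             return False
--
--     return True
-- ===== SOURCE B (Python) =====
-- def is_odd_heavy(arr):
--     max_even = None
--     min_odd = None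
--     for i in arr:
--         if i % 2 != 0:
--             if min_odd is None or i < min_odd:
--                 min_odd = i
--         else:
--             if max_even is None or i > max_even:
--                 max_even = i
--     if min_odd is None:
--         return False
--     if max_even is None:
--         return True
--     return min_odd > max_even
-- ===== Notes on version B (the rewrite author's own statement) =====
-- stated objective: alternative
-- what changed: Replaces the two filter comprehensions plus max() and a scan of the odd list by a single pass over arr maintaining a running maximum even and minimum odd, comparing the two scalars at the end.
import Mathlib
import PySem

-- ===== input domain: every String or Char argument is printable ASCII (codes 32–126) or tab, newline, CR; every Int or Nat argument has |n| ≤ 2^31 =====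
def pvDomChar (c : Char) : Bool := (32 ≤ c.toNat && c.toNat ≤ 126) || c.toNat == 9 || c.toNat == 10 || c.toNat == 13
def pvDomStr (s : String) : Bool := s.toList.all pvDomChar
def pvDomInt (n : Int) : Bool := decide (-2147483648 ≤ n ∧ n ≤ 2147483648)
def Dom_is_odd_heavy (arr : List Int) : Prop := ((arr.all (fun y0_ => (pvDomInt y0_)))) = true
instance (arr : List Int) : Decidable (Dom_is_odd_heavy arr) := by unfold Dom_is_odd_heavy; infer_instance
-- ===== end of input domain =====

-- B replaces A's two filter comprehensions + max() + scan by a single pass keeping a running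
-- maximum even and minimum odd (objective: alternative decomposition, same O(n) cost).

-- ===== PORT A =====
def is_odd_heavy (arr : List Int) : Bool :=
  let odd_arr := arr.filter (fun i => decide (PySem.Int.mod i 2 ≠ 0))
  let even_arr := arr.filter (fun i => decide (PySem.Int.mod i 2 = 0))
  if odd_arr.isEmpty then false
  else if even_arr.isEmpty then true
  else
    match PySem.List.max? even_arr (fun y => y) with
    | none => true
    | some max_even =>
      -- the for-loop returning False on the first i with max_even ≥ i, else True
      odd_arr.all (fun i => decide (¬ (max_even ≥ i)))

-- ===== PORT B =====
-- one step of B's loop: update (max_even, min_odd) with element i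
def altStep (s : Option Int × Option Int) (i : Int) : Option Int × Option Int :=
  if PySem.Int.mod i 2 ≠ 0 then
    match s.2 with
    | none => (s.1, some i)
    | some m => if i < m then (s.1, some i) else s
  else
    match s.1 with
    | none => (some i, s.2)
    | some m => if i > m then (some i, s.2) else s

def is_odd_heavy_alt (arr : List Int) : Bool :=
  let s := arr.foldl altStep (none, none)
  match s.2 with
  | none => false
  | some min_odd =>
    match s.1 with
    | none => true
    | some max_even => decide (min_odd > max_even)

-- ===== PRECONDITION & SPEC =====
def Spec_is_odd_heavy (arr : List Int) (out : Bool) : Prop := out = is_odd_heavy_alt arr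
instance (arr : List Int) (out : Bool) : Decidable (Spec_is_odd_heavy arr out) := by unfold Spec_is_odd_heavy; infer_instance

-- ===== CLAIM (what is proved, stated in full; the proofs are below) =====
def Claim_equal_is_odd_heavy : Prop := ∀ (arr : List Int), Dom_is_odd_heavy arr → Spec_is_odd_heavy arr (is_odd_heavy arr)

-- ===== LEMMAS AND PROOFS =====

def omin' (a : Option Int) (i : Int) : Option Int :=
  match a with
  | none => some i
  | some m => if i < m then some i else some m

def omax' (a : Option Int) (i : Int) : Option Int :=
  match a with
  | none => some i
  | some m => if i > m then some i else some m

lemma altStep_even (a b : Option Int) (x : Int) (hx : PySem.Int.mod x 2 = 0) :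
    altStep (a, b) x = (omax' a x, b) := by
  unfold altStep omax'
  rw [if_neg (not_not_intro hx)]
  cases a with
  | none => rfl
  | some m => dsimp only; split <;> rfl

lemma altStep_odd (a b : Option Int) (x : Int) (hx : PySem.Int.mod x 2 ≠ 0) :
    altStep (a, b) x = (a, omin' b x) := by
  unfold altStep omin'
  rw [if_pos hx]
  cases b with
  | none => rfl
  | some m => dsimp only; split <;> rfl

lemma fold_inv (l : List Int) (a b : Option Int) :
    l.foldl altStep (a, b) =
      ((l.filter (fun i => decide (PySem.Int.mod i 2 = 0))).foldl omax' a,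
       (l.filter (fun i => decide (PySem.Int.mod i 2 ≠ 0))).foldl omin' b) := by
  induction l generalizing a b with
  | nil => rfl
  | cons x t ih =>
    by_cases hx : PySem.Int.mod x 2 = 0
    · have h1 : (decide (PySem.Int.mod x 2 = 0)) = true := decide_eq_true hx
      have h2 : (decide (PySem.Int.mod x 2 ≠ 0)) = false := decide_eq_false (not_not_intro hx)
      simp only [List.foldl_cons, List.filter_cons, h1, h2, Bool.false_eq_true,
        if_true, if_false, altStep_even a b x hx, ih]
    · have h1 : (decide (PySem.Int.mod x 2 = 0)) = false := decide_eq_false hx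
      have h2 : (decide (PySem.Int.mod x 2 ≠ 0)) = true := decide_eq_true hx
      simp only [List.foldl_cons, List.filter_cons, h1, h2, Bool.false_eq_true,
        if_true, if_false, altStep_odd a b x hx, ih]

lemma omin'_some (m i : Int) : omin' (some m) i = some (min m i) := by
  show (if i < m then some i else some m) = some (min m i)
  by_cases h : i < m
  · rw [if_pos h, min_eq_right h.le]
  · rw [if_neg h, min_eq_left (not_lt.mp h)]

lemma omax'_some (m i : Int) : omax' (some m) i = some (max m i) := by
  show (if i > m then some i else some m) = some (max m i)
  by_cases h : i > m
  · rw [if_pos h, max_eq_right h.le]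
  · rw [if_neg h, max_eq_left (not_lt.mp h)]

lemma foldl_omin'_some (t : List Int) (m : Int) :
    t.foldl omin' (some m) = some (t.foldl min m) := by
  induction t generalizing m with
  | nil => rfl
  | cons x t ih => simp [omin'_some, ih]

lemma foldl_omax'_some (t : List Int) (m : Int) :
    t.foldl omax' (some m) = some (t.foldl max m) := by
  induction t generalizing m with
  | nil => rfl
  | cons x t ih => simp [omax'_some, ih]

lemma omin'_none (i : Int) : omin' none i = some i := rfl
lemma omax'_none (i : Int) : omax' none i = some i := rfl

-- ===== VERDICT (by name: the statement is the Claim_ definition above) =====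
theorem is_odd_heavy_spec : Claim_equal_is_odd_heavy := by
  intro arr _
  unfold Spec_is_odd_heavy is_odd_heavy is_odd_heavy_alt
  rw [fold_inv]
  cases hodd : arr.filter (fun i => decide (PySem.Int.mod i 2 ≠ 0)) with
  | nil => simp
  | cons o ot =>
    cases heven : arr.filter (fun i => decide (PySem.Int.mod i 2 = 0)) with
    | nil =>
      simp only [List.isEmpty_cons, List.isEmpty_nil, if_true, Bool.false_eq_true,
        if_false, List.foldl_cons, List.foldl_nil, omin'_none, foldl_omin'_some]
    | cons e et =>
      simp only [List.isEmpty_cons, Bool.false_eq_true, if_false, List.foldl_cons,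
        omin'_none, omax'_none, foldl_omin'_some, foldl_omax'_some,
        PySem.List.max?_id_cons]
      set M := et.foldl max e with hM
      set mo := ot.foldl min o with hmo
      have hmo_spec : PySem.List.min? (o :: ot) (fun y => y) = some mo := by
        rw [PySem.List.min?_id_cons]
      have hmem : mo ∈ o :: ot := PySem.List.min?_mem hmo_spec
      have hle : ∀ y ∈ o :: ot, mo ≤ y := fun y hy => PySem.List.min?_isMin hmo_spec y hy
      by_cases h : M < mo
      · simp only [gt_iff_lt, h, decide_true]
        apply List.all_eq_true.2
        intro y hy
        have := hle y hy
        exact decide_eq_true (by omega)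
      · simp only [gt_iff_lt, h, decide_false]
        refine List.all_eq_false.mpr ⟨mo, hmem, fun hc => h ?_⟩
        have := of_decide_eq_true hc
        omega
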